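-- pv_equiv track=rewrite | github.com/atulapra/scanner | scanner/unusual_options_scan_nw.py | pick_expiries
-- ===== SOURCE A (Python) =====
-- MAX_EXPIRIES_PER_TICKER = 8
--
-- START_DATE_CUTOFF = "2024-12-29"
--
-- END_DATE_CUTOFF   = "2026-01-31"
--
-- def pick_expiries(all_exps):
--     """
--     Filter expiries to be between START_DATE_CUTOFF and END_DATE_CUTOFF.
--     Then pick the nearest MAX_EXPIRIES_PER_TICKER - 1, plus Jan-2026 if present.
--     """
--     low  = START_DATE_CUTOFF
--     high = END_DATE_CUTOFF
--
--     exps = [e for e in all_exps if low <= e <= high]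
--     exps_sorted = sorted(exps)
--
--     # nearest expiries
--     chosen = exps_sorted[:max(0, MAX_EXPIRIES_PER_TICKER - 1)]
--
--     # include January 2026 expiry if exists
--     jan26 = [e for e in exps_sorted if e.startswith("2026-01")]
--     if jan26:
--         pick = jan26[0]
--         if pick not in chosen:
--             chosen.append(pick)
--
--     return chosen
-- ===== SOURCE B (Python) =====
-- # One-pass bounded selection: keeps the 7 nearest in-range expiries by ordered
-- # insertion into a trimmed buffer and tracks the earliest Jan-2026 expiry on the
-- # fly, instead of sorting the whole filtered list and rescanning it.
-- MAX_EXPIRIES_PER_TICKER = 8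
--
-- START_DATE_CUTOFF = "2024-12-29"
--
-- END_DATE_CUTOFF   = "2026-01-31"
--
--
-- def _insert_asc(e, best):
--     """Insert e into the ascending list best, keeping it ascending."""
--     for i, y in enumerate(best):
--         if e < y:
--             return best[:i] + [e] + best[i:]
--     return best + [e]
--
--
-- def pick_expiries(all_exps):
--     keep = MAX_EXPIRIES_PER_TICKER - 1
--     best = []
--     jan26 = None
--     for e in all_exps:
--         if START_DATE_CUTOFF <= e <= END_DATE_CUTOFF:
--             best = _insert_asc(e, best)[:keep]
--             if e.startswith("2026-01") and (jan26 is None or e < jan26):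
--                 jan26 = e
--     if jan26 is not None and jan26 not in best:
--         best.append(jan26)
--     return best
-- ===== Notes on version B (the rewrite author's own statement) =====
-- stated objective: alternative
-- what changed: Replaces filter-then-full-sort-then-rescan with a single pass that maintains a 7-element ordered selection buffer by trimmed insertion and tracks the minimal Jan-2026 expiry on the fly.
import Mathlib
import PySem

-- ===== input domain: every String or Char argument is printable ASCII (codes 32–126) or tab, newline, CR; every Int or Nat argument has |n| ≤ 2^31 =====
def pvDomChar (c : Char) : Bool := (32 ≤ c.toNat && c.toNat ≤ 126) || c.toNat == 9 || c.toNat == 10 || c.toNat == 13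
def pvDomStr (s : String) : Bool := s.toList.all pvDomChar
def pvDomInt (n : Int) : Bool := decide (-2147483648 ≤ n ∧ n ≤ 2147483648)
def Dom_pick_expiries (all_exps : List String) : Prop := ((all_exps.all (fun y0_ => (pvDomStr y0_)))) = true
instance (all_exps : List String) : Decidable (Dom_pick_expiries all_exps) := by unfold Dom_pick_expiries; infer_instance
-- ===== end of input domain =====

-- B replaces A's filter → full sort → rescan with a single pass keeping a 7-element
-- ordered selection buffer and the running minimal Jan-2026 expiry (objective: alternative).

-- ===== PORT A =====
def pick_expiries (all_exps : List String) : List String :=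
  let low := "2024-12-29"
  let high := "2026-01-31"
  let exps := all_exps.filter (fun e => decide (low ≤ e) && decide (e ≤ high))
  let exps_sorted := PySem.List.sorted exps (fun x => x)
  let chosen := PySem.List.slice exps_sorted none (some (max 0 (8 - 1 : Int)))
  let jan26 := exps_sorted.filter (fun e => PySem.Str.startswith e "2026-01")
  match jan26 with
  | [] => chosen
  | pick :: _ => if pick ∈ chosen then chosen else chosen ++ [pick]

-- ===== PORT B =====
-- _insert_asc from Source B: insert e into the ascending list, keeping it ascending
def pvInsertAsc (e : String) : List String → List String
  | [] => [e]
  | y :: t => if e < y then e :: y :: t else y :: pvInsertAsc e t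

-- one iteration of Source B's loop body over the state (best, jan26); keep = 8 - 1 = 7
def pvStep (st : List String × Option String) (e : String) : List String × Option String :=
  if decide ("2024-12-29" ≤ e) && decide (e ≤ "2026-01-31") then
    ((pvInsertAsc e st.1).take 7,
     if PySem.Str.startswith e "2026-01" && st.2.elim true (fun j => decide (e < j))
     then some e else st.2)
  else st

def pick_expiries_alt (all_exps : List String) : List String :=
  let st := all_exps.foldl pvStep ([], none)
  match st.2 with
  | none => st.1
  | some j => if j ∈ st.1 then st.1 else st.1 ++ [j]

-- ===== PRECONDITION & SPEC =====
def Spec_pick_expiries (all_exps : List String) (out : List String) : Prop := out = pick_expiries_alt all_exps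
instance (all_exps : List String) (out : List String) : Decidable (Spec_pick_expiries all_exps out) := by unfold Spec_pick_expiries; infer_instance

-- ===== CLAIM (what is proved, stated in full; the proofs are below) =====
def Claim_equal_pick_expiries : Prop := ∀ (all_exps : List String), Dom_pick_expiries all_exps → Spec_pick_expiries all_exps (pick_expiries all_exps)

-- ===== LEMMAS AND PROOFS =====

-- proof-side abbreviations
def pvInR (e : String) : Bool := decide ("2024-12-29" ≤ e) && decide (e ≤ "2026-01-31")
def pvPref (e : String) : Bool := PySem.Str.startswith e "2026-01"
-- the jan26 update on the prefix-filtered list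
def pvMStep (j : Option String) (e : String) : Option String :=
  match j with
  | none => some e
  | some m => some (if e < m then e else m)

theorem pvFoldlCongr {α β : Type} (xs : List α) (f g : β → α → β) (b : β)
    (h : ∀ acc a, f acc a = g acc a) : xs.foldl f b = xs.foldl g b := by
  induction xs generalizing b with
  | nil => rfl
  | cons x t ih => simp only [List.foldl_cons, h]; exact ih _

theorem pvInsertAsc_eq (e : String) (l : List String) :
    pvInsertAsc e l = PySem.List.insertBy (fun a b => decide (a < b)) e l := by
  induction l with
  | nil => rfl
  | cons y t ih => simp [pvInsertAsc, PySem.List.insertBy, ih]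

theorem take_cons_take (k : Nat) (y : String) (t : List String) :
    (y :: t.take k).take k = (y :: t).take k := by
  cases k with
  | zero => simp
  | succ k' => simp [List.take_take]

theorem pvInsertAsc_take (k : Nat) (e : String) (l : List String) :
    ((pvInsertAsc e (l.take k)).take k) = (pvInsertAsc e l).take k := by
  induction l generalizing k with
  | nil => simp
  | cons y t ih =>
    cases k with
    | zero => simp
    | succ k' =>
      by_cases h : e < y
      · simp [pvInsertAsc, h, take_cons_take]
      · simp [pvInsertAsc, h, ih]

theorem foldl_best (xs : List String) (acc : List String) (j : Option String) :
    (xs.foldl pvStep (acc, j)).1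
      = (xs.filter pvInR).foldl (fun a e => (pvInsertAsc e a).take 7) acc := by
  induction xs generalizing acc j with
  | nil => rfl
  | cons e t ih =>
    rcases Bool.eq_false_or_eq_true (pvInR e) with h | h
    · have hstep : pvStep (acc, j) e
          = ((pvInsertAsc e acc).take 7,
             if PySem.Str.startswith e "2026-01" && j.elim true (fun m => decide (e < m))
             then some e else j) := by
        simp only [pvStep]
        rw [if_pos (show (decide ("2024-12-29" ≤ e) && decide (e ≤ "2026-01-31")) = true from h)]
      rw [List.foldl_cons, hstep, List.filter_cons, if_pos h, List.foldl_cons]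
      exact ih _ _
    · have hstep : pvStep (acc, j) e = (acc, j) := by
        simp only [pvStep]
        rw [if_neg (show ¬ (decide ("2024-12-29" ≤ e) && decide (e ≤ "2026-01-31")) = true from by
          rw [show (decide ("2024-12-29" ≤ e) && decide (e ≤ "2026-01-31")) = pvInR e from rfl, h]
          simp)]
      rw [List.foldl_cons, hstep, List.filter_cons, if_neg (by simp [h])]
      exact ih _ _

theorem foldl_jan (xs : List String) (acc : List String) (j : Option String) :
    (xs.foldl pvStep (acc, j)).2
      = ((xs.filter pvInR).filter pvPref).foldl pvMStep j := by
  induction xs generalizing acc j with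
  | nil => rfl
  | cons e t ih =>
    rcases Bool.eq_false_or_eq_true (pvInR e) with h | h
    · have hstep : pvStep (acc, j) e
          = ((pvInsertAsc e acc).take 7,
             if pvPref e && j.elim true (fun m => decide (e < m)) then some e else j) := by
        simp only [pvStep]
        rw [if_pos (show (decide ("2024-12-29" ≤ e) && decide (e ≤ "2026-01-31")) = true from h)]
        rfl
      rw [List.foldl_cons, hstep, List.filter_cons, if_pos h]
      rcases Bool.eq_false_or_eq_true (pvPref e) with hp | hp
      · have hcond : (if pvPref e && j.elim true (fun m => decide (e < m)) then some e else j)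
            = pvMStep j e := by
          cases j with
          | none => simp [hp, pvMStep]
          | some m =>
            rcases Classical.em (e < m) with hlt | hlt
            · have hc : (pvPref e && (some m).elim true fun m => decide (e < m)) = true := by
                show (pvPref e && decide (e < m)) = true
                rw [hp, decide_eq_true hlt, Bool.and_self]
              rw [if_pos hc]
              show some e = some (if e < m then e else m)
              rw [if_pos hlt]
            · have hc : (pvPref e && (some m).elim true fun m => decide (e < m)) = false := by
                show (pvPref e && decide (e < m)) = false
                rw [hp, decide_eq_false hlt, Bool.true_and]
              rw [if_neg (show ¬ ((pvPref e && (some m).elim true fun m => decide (e < m)) = true)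
                from by rw [hc]; exact Bool.false_ne_true)]
              show some m = some (if e < m then e else m)
              rw [if_neg hlt]
        rw [hcond, ih]
        rw [List.filter_cons, if_pos hp, List.foldl_cons]
      · rw [show (if pvPref e && j.elim true (fun m => decide (e < m)) then some e else j) = j by
          simp [hp]]
        rw [ih, List.filter_cons, if_neg (by simp [hp])]
    · have hstep : pvStep (acc, j) e = (acc, j) := by
        simp only [pvStep]
        rw [if_neg (show ¬ (decide ("2024-12-29" ≤ e) && decide (e ≤ "2026-01-31")) = true from by
          rw [show (decide ("2024-12-29" ≤ e) && decide (e ≤ "2026-01-31")) = pvInR e from rfl, h]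
          simp)]
      rw [List.foldl_cons, hstep, List.filter_cons, if_neg (by simp [h])]
      exact ih _ _

theorem foldl_insert_take (ys : List String) (acc : List String) :
    ys.foldl (fun a e => (pvInsertAsc e a).take 7) (acc.take 7)
      = (ys.foldl (fun a e => pvInsertAsc e a) acc).take 7 := by
  induction ys generalizing acc with
  | nil => rfl
  | cons e t ih =>
    simp only [List.foldl_cons]
    rw [pvInsertAsc_take, ih]

theorem foldl_insert_sorted (ys : List String) :
    ys.foldl (fun a e => pvInsertAsc e a) [] = PySem.List.sorted ys (fun x => x) := by
  rw [PySem.List.sorted_eq_foldl_insertBy]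
  exact pvFoldlCongr _ _ _ _ (fun a e => pvInsertAsc_eq e a)

-- the jan26 fold over the prefixed list is Python's min()
theorem foldl_mstep_some (zs : List String) (m : String) :
    zs.foldl pvMStep (some m) = some (zs.foldl (fun a e => if e < a then e else a) m) := by
  induction zs generalizing m with
  | nil => rfl
  | cons z t ih => simp only [List.foldl_cons, pvMStep, ih]

theorem foldl_mstep_min? (zs : List String) :
    zs.foldl pvMStep none = PySem.List.min? zs (fun y => y) := by
  cases zs with
  | nil => rfl
  | cons z t =>
    simp only [List.foldl_cons, pvMStep, foldl_mstep_some, PySem.List.min?_id_cons]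
    congr 1
    apply pvFoldlCongr
    intro a e
    rcases lt_trichotomy e a with h | h | h
    · rw [if_pos h, min_eq_right (le_of_lt h)]
    · subst h; rw [if_neg (lt_irrefl e), min_self]
    · rw [if_neg (lt_asymm h), min_eq_left (le_of_lt h)]

-- head of the prefixed filter of the sorted list = min of the prefixed filter
theorem head_filter_sorted (ys : List String) (p : String) (rest : List String)
    (h : (PySem.List.sorted ys (fun x => x)).filter pvPref = p :: rest) :
    PySem.List.min? (ys.filter pvPref) (fun y => y) = some p := by
  have hpmem : p ∈ (PySem.List.sorted ys (fun x => x)).filter pvPref := by rw [h]; exact List.mem_cons_self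
  have hp1 : p ∈ ys := by
    have := List.mem_filter.mp hpmem
    exact (PySem.List.mem_sorted _ _ _ _).mp this.1
  have hpp : pvPref p = true := (List.mem_filter.mp hpmem).2
  have hne : ys.filter pvPref ≠ [] := by
    intro hnil
    have : p ∈ ys.filter pvPref := List.mem_filter.mpr ⟨hp1, hpp⟩
    simp [hnil] at this
  have hmne : PySem.List.min? (ys.filter pvPref) (fun y => y) ≠ none := by
    intro hnone
    exact hne ((PySem.List.min?_eq_none_iff _ _).mp hnone)
  obtain ⟨m, hm⟩ := Option.ne_none_iff_exists'.mp hmne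
  have hmmem : m ∈ ys.filter pvPref := PySem.List.min?_mem hm
  have hmin : ∀ y ∈ ys.filter pvPref, m ≤ y := by
    intro y hy; exact PySem.List.min?_isMin hm y hy
  -- m ≤ p
  have hmp : m ≤ p := hmin p (List.mem_filter.mpr ⟨hp1, hpp⟩)
  -- p ≤ m : m appears in the sorted-then-filtered list, whose head is p
  have hmsorted : m ∈ (PySem.List.sorted ys (fun x => x)).filter pvPref := by
    refine List.mem_filter.mpr ⟨?_, (List.mem_filter.mp hmmem).2⟩
    exact (PySem.List.mem_sorted _ _ _ _).mpr (List.mem_filter.mp hmmem).1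
  have hpair : ((PySem.List.sorted ys (fun x => x)).filter pvPref).Pairwise (· ≤ ·) := by
    exact List.Pairwise.filter _ (PySem.List.sorted_pairwise ys (fun x => x))
  have hpm : p ≤ m := by
    rw [h] at hmsorted hpair
    cases hmsorted with
    | head => exact le_refl _
    | tail _ hmrest => exact (List.pairwise_cons.mp hpair).1 m hmrest
  rw [hm, le_antisymm hmp hpm]

-- ===== VERDICT (by name: the statement is the Claim_ definition above) =====
theorem pick_expiries_spec : Claim_equal_pick_expiries := by
  intro all_exps _
  unfold Spec_pick_expiries
  have hbest : (all_exps.foldl pvStep ([], none)).1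
      = (PySem.List.sorted (all_exps.filter pvInR) (fun x => x)).take 7 := by
    rw [foldl_best]
    have h0 := foldl_insert_take (all_exps.filter pvInR) []
    simp only [List.take_nil] at h0
    rw [h0, foldl_insert_sorted]
  have hjan := foldl_jan all_exps [] none
  have hslice : PySem.List.slice
      (PySem.List.sorted (all_exps.filter pvInR) (fun x => x)) none (some (max 0 (8 - 1 : Int)))
      = (PySem.List.sorted (all_exps.filter pvInR) (fun x => x)).take 7 := by
    rw [show (max 0 (8 - 1 : Int)) = ((7 : Nat) : Int) by norm_num]
    exact PySem.List.slice_to_natCast _ 7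
  show (match (PySem.List.sorted (all_exps.filter pvInR) (fun x => x)).filter pvPref with
        | [] => PySem.List.slice (PySem.List.sorted (all_exps.filter pvInR) (fun x => x)) none (some (max 0 (8 - 1 : Int)))
        | pick :: _ =>
          if pick ∈ PySem.List.slice (PySem.List.sorted (all_exps.filter pvInR) (fun x => x)) none (some (max 0 (8 - 1 : Int)))
          then PySem.List.slice (PySem.List.sorted (all_exps.filter pvInR) (fun x => x)) none (some (max 0 (8 - 1 : Int)))
          else PySem.List.slice (PySem.List.sorted (all_exps.filter pvInR) (fun x => x)) none (some (max 0 (8 - 1 : Int))) ++ [pick])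
      = (match (all_exps.foldl pvStep ([], none)).2 with
        | none => (all_exps.foldl pvStep ([], none)).1
        | some j => if j ∈ (all_exps.foldl pvStep ([], none)).1
                    then (all_exps.foldl pvStep ([], none)).1
                    else (all_exps.foldl pvStep ([], none)).1 ++ [j])
  rw [hslice, hbest, hjan]
  cases hcase : (PySem.List.sorted (all_exps.filter pvInR) (fun x => x)).filter pvPref with
  | nil =>
    have hempty : (all_exps.filter pvInR).filter pvPref = [] := by
      rw [List.filter_eq_nil_iff] at hcase ⊢
      intro a ha
      exact hcase a ((PySem.List.mem_sorted _ _ _ _).mpr ha)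
    rw [hempty]
    rfl
  | cons p rest =>
    have hmin : ((all_exps.filter pvInR).filter pvPref).foldl pvMStep none = some p := by
      rw [foldl_mstep_min?]
      exact head_filter_sorted (all_exps.filter pvInR) p rest hcase
    rw [hmin]
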